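-- pv_equiv track=rewrite | github.com/Shreya-Shindee/Multi-Modal-Content-Moderation-System | fix_formatting.py | fix_blank_lines
-- ===== SOURCE A (Python) =====
-- def fix_blank_lines(content: str) -> str:
--     """Fix blank line issues around function/class definitions."""
--     lines = content.split("\n")
--     fixed_lines = []
--
--     i = 0
--     while i < len(lines):
--         line = lines[i]
--
--         # Check for function/class definitions that need 2 blank lines before
--         if (
--             line.strip().startswith("def ")
--             or line.strip().startswith("class ")
--         ) and i > 0:
--             # Don't add blank lines if we're inside a class (indented method)
--             if not line.startswith("    ") or line.strip().startswith(
--                 "class "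
--             ):
--                 # Check how many blank lines we have before
--                 blank_count = 0
--                 j = i - 1
--                 while j >= 0 and not lines[j].strip():
--                     blank_count += 1
--                     j -= 1
--
--                 # Remove existing blank lines and add exactly 2
--                 while fixed_lines and not fixed_lines[-1].strip():
--                     fixed_lines.pop()
--
--                 # Add 2 blank lines before top-level functions/classes
--                 if j >= 0 and not lines[j].startswith(
--                     "    "
--                 ):  # Previous line wasn't indented
--                     fixed_lines.extend(["", ""])
--
--         fixed_lines.append(line)
--         i += 1
--
--     return "\n".join(fixed_lines)
-- ===== SOURCE B (Python) =====
-- def fix_blank_lines(content: str) -> str: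
--     """Fix blank line issues around function/class definitions.
--
--     One forward pass: blank lines are buffered in `pending` instead of being
--     emitted and later popped, and the last non-blank line seen replaces A's
--     backward scan over the original lines.
--     """
--     out = []
--     pending = []          # blank lines not yet emitted
--     last_nonblank = None  # last non-blank line seen so far
--     first = True          # no line processed yet
--     for line in content.split("\n"):
--         stripped = line.strip()
--         if not stripped:
--             pending.append(line)
--         else:
--             if (
--                 (stripped.startswith("def ") or stripped.startswith("class "))
--                 and not first
--                 and (not line.startswith("    ") or stripped.startswith("class "))
--             ):
--                 # drop buffered blanks; insert exactly two if the previous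
--                 # non-blank line exists and is not indented
--                 pending = []
--                 if last_nonblank is not None and not last_nonblank.startswith("    "):
--                     out.extend(["", ""])
--             else:
--                 out.extend(pending)
--                 pending = []
--             out.append(line)
--             last_nonblank = line
--         first = False
--     out.extend(pending)
--     return "\n".join(out)
-- ===== Notes on version B (the rewrite author's own statement) =====
-- stated objective: simpler
-- what changed: Replaces A's backward re-scan over the original lines and its pop-trailing-blanks loop with a single forward pass that buffers blank lines in a pending list and remembers the last non-blank line seen.
import Mathlib
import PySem

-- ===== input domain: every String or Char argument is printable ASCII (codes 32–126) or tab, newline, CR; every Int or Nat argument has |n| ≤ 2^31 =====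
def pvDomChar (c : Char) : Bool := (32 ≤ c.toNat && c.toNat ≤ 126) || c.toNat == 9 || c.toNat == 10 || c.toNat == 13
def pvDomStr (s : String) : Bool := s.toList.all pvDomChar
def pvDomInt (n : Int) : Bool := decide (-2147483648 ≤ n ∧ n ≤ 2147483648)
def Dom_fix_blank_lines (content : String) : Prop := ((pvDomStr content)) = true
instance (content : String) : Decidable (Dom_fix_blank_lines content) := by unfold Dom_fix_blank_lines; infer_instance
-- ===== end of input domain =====

-- B keeps one forward pass but buffers blank lines and remembers the last non-blank
-- line, replacing A's backward index scan and its pop loop; objective: simpler (same cost).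

-- ===== PORT A =====

/-- `not line.strip()` truthiness -/
def pvBlank (line : String) : Bool := PySem.Str.strip line == ""

/-- `s.startswith("def ") or s.startswith("class ")` -/
def pvIsDefClass (s : String) : Bool :=
  PySem.Str.startswith s "def " || PySem.Str.startswith s "class "

/-- `while fixed_lines and not fixed_lines[-1].strip(): fixed_lines.pop()` -/
def pvPopBlanks (xs : List String) : List String :=
  (xs.reverse.dropWhile pvBlank).reverse

/-- `j = i - 1; while j >= 0 and not lines[j].strip(): j -= 1` — result `some j`, or `none` for j = -1 -/
def pvBackScan (lines : List String) : Nat → Option Nat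
  | 0 => if pvBlank (lines.getD 0 "") then none else some 0
  | j + 1 => if pvBlank (lines.getD (j + 1) "") then pvBackScan lines j else some (j + 1)

/-- the `while i < len(lines)` loop of A -/
def pvALoop (lines : List String) (fixed : List String) (i : Nat) : List String :=
  if h : i < lines.length then
    let line := lines[i]
    let fixed' :=
      if pvIsDefClass (PySem.Str.strip line) && decide (0 < i) then
        if !(PySem.Str.startswith line "    ")
            || PySem.Str.startswith (PySem.Str.strip line) "class " then
          let popped := pvPopBlanks fixed
          match pvBackScan lines (i - 1) with
          | some j =>
              if !(PySem.Str.startswith (lines.getD j "") "    ") then popped ++ ["", ""]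
              else popped
          | none => popped
        else fixed
      else fixed
    pvALoop lines (fixed' ++ [line]) (i + 1)
  else fixed
termination_by lines.length - i

def fix_blank_lines (content : String) : String :=
  PySem.Str.join "\n" (pvALoop ((PySem.Str.split? content "\n").getD []) [] 0)

-- ===== PORT B =====

/-- one step of B's single forward pass: state = (out, pending blanks, last non-blank, first) -/
def pvBStep (st : List String × List String × Option String × Bool) (line : String) :
    List String × List String × Option String × Bool :=
  let (out, pending, lastnb, first) := st
  if pvBlank line then
    (out, pending ++ [line], lastnb, false)
  else
    let stripped := PySem.Str.strip line
    if pvIsDefClass stripped && !first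
        && (!(PySem.Str.startswith line "    ") || PySem.Str.startswith stripped "class ") then
      let out' :=
        match lastnb with
        | some s => if !(PySem.Str.startswith s "    ") then out ++ ["", ""] else out
        | none => out
      (out' ++ [line], [], some line, false)
    else
      (out ++ pending ++ [line], [], some line, false)

def fix_blank_lines_alt (content : String) : String :=
  let st := ((PySem.Str.split? content "\n").getD []).foldl pvBStep ([], [], none, true)
  PySem.Str.join "\n" (st.1 ++ st.2.1)

-- ===== PRECONDITION & SPEC =====
def Spec_fix_blank_lines (content : String) (out : String) : Prop := out = fix_blank_lines_alt content
instance (content : String) (out : String) : Decidable (Spec_fix_blank_lines content out) := by unfold Spec_fix_blank_lines; infer_instance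

-- ===== CLAIM (what is proved, stated in full; the proofs are below) =====
def Claim_equal_fix_blank_lines : Prop := ∀ (content : String), Dom_fix_blank_lines content → Spec_fix_blank_lines content (fix_blank_lines content)

-- ===== LEMMAS AND PROOFS =====

theorem pvIsDefClass_of_blank (l : String) (h : pvBlank l = true) :
    pvIsDefClass (PySem.Str.strip l) = false := by
  simp only [pvBlank, beq_iff_eq] at h
  simp [pvIsDefClass, h, PySem.Str.startswith, PySem.Chars.startswith]

theorem pvPopBlanks_append (out pending : List String)
    (hp : ∀ b ∈ pending, pvBlank b = true)
    (ho : out = [] ∨ ∃ s, out.getLast? = some s ∧ pvBlank s = false) :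
    pvPopBlanks (out ++ pending) = out := by
  unfold pvPopBlanks
  rw [List.reverse_append, List.dropWhile_append]
  have hdp : pending.reverse.dropWhile pvBlank = [] := by
    rw [List.dropWhile_eq_nil_iff]
    intro x hx; exact hp x (List.mem_reverse.mp hx)
  rw [hdp]
  simp only [List.isEmpty_nil]
  rcases ho with h | ⟨s, hs, hb⟩
  · simp [h]
  · rcases List.eq_nil_or_concat out with h | ⟨o, a, rfl⟩
    · simp [h] at hs
    · rw [List.concat_eq_append] at *
      rw [List.getLast?_concat] at hs
      cases hs
      simp only [if_true, List.reverse_append, List.reverse_singleton, List.singleton_append]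
      rw [List.dropWhile_cons_of_neg (by simp [hb])]
      simp

theorem pv_getD_mem (xs : List String) (j : Nat) (hj : j < xs.length) :
    xs.getD j "" ∈ xs := by
  rw [List.getD_eq_getElem xs "" hj]
  exact List.getElem_mem hj

theorem pvBackScan_blank (pending tail : List String)
    (hp : ∀ b ∈ pending, pvBlank b = true) :
    ∀ j, j < pending.length → pvBackScan (pending ++ tail) j = none := by
  intro j
  induction j with
  | zero =>
    intro hj
    rw [pvBackScan, List.getD_append _ _ _ _ hj, if_pos (hp _ (pv_getD_mem _ _ hj))]
  | succ k ih =>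
    intro hj
    rw [pvBackScan, List.getD_append _ _ _ _ hj, if_pos (hp _ (pv_getD_mem _ _ hj))]
    exact ih (Nat.lt_of_succ_lt hj)

theorem pvLines_getD_found (c : List String) (s : String) (tail : List String) :
    ((c ++ [s]) ++ tail).getD c.length "" = s := by
  rw [List.getD_append _ _ _ _ (by simp)]
  simp [List.getD]

theorem pvBackScan_found (c : List String) (s : String) (hs : pvBlank s = false) :
    ∀ (pending : List String), (∀ b ∈ pending, pvBlank b = true) →
    ∀ (tail : List String),
      pvBackScan ((c ++ [s]) ++ pending ++ tail) (c.length + pending.length) = some c.length := by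
  intro pending
  induction pending using List.reverseRecOn with
  | nil =>
    intro _ tail
    simp only [List.length_nil, Nat.add_zero, List.append_nil]
    have hget : ((c ++ [s]) ++ tail).getD c.length "" = s := pvLines_getD_found c s tail
    cases hcl : c.length with
    | zero =>
      rw [hcl] at hget
      rw [pvBackScan, hget, if_neg (by simp [hs])]
    | succ k =>
      rw [hcl] at hget
      rw [pvBackScan, hget, if_neg (by simp [hs])]
  | append_singleton p b ih =>
    intro hp tail
    have hb : pvBlank b = true := hp b (by simp)
    have hp' : ∀ x ∈ p, pvBlank x = true := fun x hx => hp x (by simp [hx])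
    have hassoc : (c ++ [s]) ++ (p ++ [b]) ++ tail = (((c ++ [s]) ++ p) ++ [b]) ++ tail := by
      simp
    have hget : ((((c ++ [s]) ++ p) ++ [b]) ++ tail).getD (((c ++ [s]) ++ p).length) "" = b :=
      pvLines_getD_found _ b tail
    have hlen : c.length + (p ++ [b]).length = ((c ++ [s]) ++ p).length := by simp
    have hlen2 : ((c ++ [s]) ++ p).length = (c.length + p.length) + 1 := by
      simp only [List.length_append, List.length_cons, List.length_nil]; omega
    rw [hassoc, hlen, hlen2, pvBackScan]
    rw [← hlen2, hget, if_pos hb]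

    have := ih hp' (b :: tail)
    rw [show (c ++ [s]) ++ p ++ (b :: tail) = (((c ++ [s]) ++ p) ++ [b]) ++ tail by simp] at this
    exact this

/-- main loop invariant: A's while-loop from position `i = |core| + |pending|` over
    `lines = core ++ pending ++ rest` with accumulator `out ++ pending` computes the same
    list as B's fold over `rest` from state `(out, pending, lastnb, i == 0)`. -/
theorem pvLoop_eq (rest : List String) :
    ∀ (core pending out : List String) (lastnb : Option String),
    (∀ b ∈ pending, pvBlank b = true) →
    (out = [] ∨ ∃ s, out.getLast? = some s ∧ pvBlank s = false) →
    (match lastnb with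
     | none => core = []
     | some s => ∃ c, core = c ++ [s] ∧ pvBlank s = false) →
    pvALoop (core ++ pending ++ rest) (out ++ pending) (core.length + pending.length)
      = (fun st : List String × List String × Option String × Bool => st.1 ++ st.2.1)
          (rest.foldl pvBStep (out, pending, lastnb, decide (core.length + pending.length = 0))) := by
  induction rest with
  | nil =>
    intro core pending out lastnb _ _ _
    rw [pvALoop]
    simp
  | cons l rest ih =>
    intro core pending out lastnb hp ho hc
    have hi : core.length + pending.length < (core ++ pending ++ (l :: rest)).length := by
      simp
    have hgetl : ∀ h, (core ++ pending ++ (l :: rest))[core.length + pending.length]'h = l := by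
      intro h
      exact List.getElem_of_append (l₁ := core ++ pending) (l₂ := rest) (by simp) (by simp)
    rw [pvALoop, dif_pos hi]
    simp only [hgetl]
    by_cases hbl : pvBlank l = true
    · -- blank line: A appends it verbatim; B buffers it
      rw [pvIsDefClass_of_blank l hbl]
      simp only [Bool.false_and, Bool.false_eq_true, if_false]
      have step : pvBStep (out, pending, lastnb, decide (core.length + pending.length = 0)) l
          = (out, pending ++ [l], lastnb, false) := by
        simp [pvBStep, hbl]
      rw [List.foldl_cons, step]
      have hp' : ∀ b ∈ pending ++ [l], pvBlank b = true := by
        intro b hb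
        rcases List.mem_append.mp hb with h | h
        · exact hp b h
        · simp at h; subst h; exact hbl
      have := ih core (pending ++ [l]) out lastnb hp' ho hc
      rw [show core ++ (pending ++ [l]) ++ rest = core ++ pending ++ (l :: rest) by simp,
        show out ++ (pending ++ [l]) = (out ++ pending) ++ [l] by simp,
        show core.length + (pending ++ [l]).length = core.length + pending.length + 1 by
          simp only [List.length_append, List.length_cons, List.length_nil]; omega,
        show decide (core.length + pending.length + 1 = 0) = false by simp] at this
      exact this
    · -- non-blank line
      rw [Bool.not_eq_true] at hbl
      have hfold :
          ∀ out' : List String,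
          pvALoop (core ++ pending ++ (l :: rest)) (out' ++ [l]) (core.length + pending.length + 1)
            = (fun st : List String × List String × Option String × Bool => st.1 ++ st.2.1)
                (rest.foldl pvBStep (out' ++ [l], [], some l, false)) := by
        intro out'
        have := ih (core ++ pending ++ [l]) [] (out' ++ [l]) (some l)
          (by simp) (Or.inr ⟨l, List.getLast?_concat, hbl⟩)
          ⟨core ++ pending, by simp, hbl⟩
        rw [show core ++ pending ++ [l] ++ [] ++ rest = core ++ pending ++ (l :: rest) by simp,
          List.append_nil,
          show (core ++ pending ++ [l]).length + ([] : List String).length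
            = core.length + pending.length + 1 by
            simp only [List.length_append, List.length_cons, List.length_nil],
          show decide (core.length + pending.length + 1 = 0) = false by simp] at this
        exact this
      by_cases hq : (pvIsDefClass (PySem.Str.strip l)
          && !(decide (core.length + pending.length = 0))
          && (!(PySem.Str.startswith l "    ")
              || PySem.Str.startswith (PySem.Str.strip l) "class ")) = true
      · -- qualifying def/class line
        have hq' := hq
        rw [Bool.and_eq_true, Bool.and_eq_true] at hq'
        obtain ⟨⟨hdc, hi0⟩, hind⟩ := hq'
        have hi0' : 0 < core.length + pending.length := by
          simp only [Bool.not_eq_eq_eq_not, Bool.not_true, decide_eq_false_iff_not] at hi0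
          omega
        rw [if_pos (by simp only [hdc, Bool.true_and]; simpa using hi0'), if_pos hind]
        rw [pvPopBlanks_append out pending hp ho]
        have step : pvBStep (out, pending, lastnb, decide (core.length + pending.length = 0)) l
            = ((match lastnb with
                | some s => if !(PySem.Str.startswith s "    ") then out ++ ["", ""] else out
                | none => out) ++ [l], [], some l, false) := by
          cases lastnb <;>
            · simp only [pvBStep, hbl, Bool.false_eq_true, if_false]
              rw [if_pos hq]
        rw [List.foldl_cons, step]
        cases lastnb with
        | none =>
          -- no previous non-blank line: core = [], the scan runs off the front
          have hcore : core = [] := hc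
          subst hcore
          simp only [List.nil_append, List.length_nil, Nat.zero_add] at hi0' ⊢
          have hscan : pvBackScan (pending ++ (l :: rest)) (pending.length - 1) = none :=
            pvBackScan_blank pending (l :: rest) hp _ (by omega)
          simp only [hscan]
          have h := hfold out
          simp only [List.nil_append, List.length_nil, Nat.zero_add] at h
          exact h
        | some s =>
          obtain ⟨c, rfl, hsnb⟩ := hc
          have hscan : pvBackScan ((c ++ [s]) ++ pending ++ (l :: rest))
              ((c ++ [s]).length + pending.length - 1) = some c.length := by
            rw [show (c ++ [s]).length + pending.length - 1 = c.length + pending.length by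
              simp only [List.length_append, List.length_cons, List.length_nil]; omega]
            exact pvBackScan_found c s hsnb pending hp (l :: rest)
          simp only [hscan]
          have hgd : ((c ++ [s]) ++ pending ++ (l :: rest)).getD c.length "" = s := by
            rw [List.append_assoc]
            exact pvLines_getD_found c s _
          rw [hgd]
          by_cases hst : PySem.Str.startswith s "    " = true
          · rw [if_neg (by rw [hst]; decide)]
            exact hfold out
          · rw [Bool.not_eq_true] at hst
            rw [if_pos (by rw [hst]; decide)]
            exact hfold (out ++ ["", ""])
      · -- ordinary non-blank line: both emit pending blanks then the line itself
        have step : pvBStep (out, pending, lastnb, decide (core.length + pending.length = 0)) l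
            = (out ++ pending ++ [l], [], some l, false) := by
          simp only [pvBStep, hbl, Bool.false_eq_true, if_false]
          rw [if_neg (by simpa using hq)]
        rw [List.foldl_cons, step]
        have hA : (if pvIsDefClass (PySem.Str.strip l)
              && decide (0 < core.length + pending.length) then
            if !(PySem.Str.startswith l "    ")
                || PySem.Str.startswith (PySem.Str.strip l) "class " then
              match pvBackScan (core ++ pending ++ (l :: rest))
                  (core.length + pending.length - 1) with
              | some j =>
                  if !(PySem.Str.startswith ((core ++ pending ++ (l :: rest)).getD j "") "    ")
                  then pvPopBlanks (out ++ pending) ++ ["", ""]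
                  else pvPopBlanks (out ++ pending)
              | none => pvPopBlanks (out ++ pending)
            else out ++ pending
          else out ++ pending) = out ++ pending := by
          -- A's guard is false here: either no def/class, i = 0, or the indent test fails
          by_cases h1 : (pvIsDefClass (PySem.Str.strip l)
              && decide (0 < core.length + pending.length)) = true
          · rw [if_pos h1]
            rw [Bool.and_eq_true] at h1
            rw [if_neg ?_]
            intro h3
            exact absurd (by
              rw [Bool.and_eq_true, Bool.and_eq_true]
              refine ⟨⟨h1.1, ?_⟩, h3⟩
              have := h1.2
              simp only [decide_eq_true_eq] at this
              simp only [Bool.not_eq_eq_eq_not, Bool.not_true, decide_eq_false_iff_not]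
              omega) hq
          · rw [if_neg h1]
        rw [hA]
        have := hfold (out ++ pending)
        rw [show out ++ pending ++ [l] = (out ++ pending) ++ [l] by simp]
        exact this

-- ===== VERDICT (by name: the statement is the Claim_ definition above) =====
theorem fix_blank_lines_spec : Claim_equal_fix_blank_lines := by
  intro content _
  unfold Spec_fix_blank_lines fix_blank_lines fix_blank_lines_alt
  have := pvLoop_eq ((PySem.Str.split? content "\n").getD []) [] [] [] none
    (by simp) (Or.inl rfl) rfl
  simp only [List.nil_append, List.append_nil, List.length_nil, Nat.add_zero] at this
  rw [this]
  simp only [decide_true]
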